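-- pv_equiv track=rewrite | github.com/ltfafei/py_Leetcode_study | interesting_Number/11.suitableNumber.py | suitableNumber
-- ===== SOURCE A (Python) =====
-- def suitableNumber(low, high):
--     l = []
--     #获取第一位，先从大到小排序，如：321，获取到第一位是1
--     for num in range(1, 10):
--         #获取从又到左前两位，根据如上就是：21，依次循环
--         for j in range(num+1, 10):
--             num = num * 10 + j
--             if num <= high and num >= low:
--                 l.append(num)
--     #从左往右，从小到大排序
--     l.sort()
--     return l
-- ===== SOURCE B (Python) =====
-- def suitableNumber(low, high):
--     # Every increasing-consecutive-digit number is a substring of "123456789"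
--     # of length >= 2; filter them into [low, high] and sort.
--     s = "123456789"
--     cands = [int(s[i:j]) for i in range(9) for j in range(i + 2, 10)]
--     return sorted(n for n in cands if low <= n <= high)
-- ===== Notes on version B (the rewrite author's own statement) =====
-- stated objective: idiomatic
-- what changed: B replaces A's multiply-accumulate inner loop (a running num rebuilt across iterations) with independent substrings of the constant "123456789" parsed by int(), then a single filter-and-sort.
import Mathlib
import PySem

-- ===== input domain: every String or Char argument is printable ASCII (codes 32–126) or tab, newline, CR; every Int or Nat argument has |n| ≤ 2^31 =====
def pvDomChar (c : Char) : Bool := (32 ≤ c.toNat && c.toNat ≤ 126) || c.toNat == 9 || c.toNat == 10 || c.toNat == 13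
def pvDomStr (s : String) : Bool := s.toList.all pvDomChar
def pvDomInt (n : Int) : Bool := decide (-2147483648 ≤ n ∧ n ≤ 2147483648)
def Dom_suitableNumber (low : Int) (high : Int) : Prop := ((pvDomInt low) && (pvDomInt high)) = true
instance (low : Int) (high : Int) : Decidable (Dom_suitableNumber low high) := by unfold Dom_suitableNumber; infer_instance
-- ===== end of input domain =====

-- B builds each candidate independently as a substring of the constant "123456789"
-- (no running accumulator), then filters and sorts; objective: idiomatic, no speed claim.

-- ===== PORT A =====
def suitableNumber (low : Int) (high : Int) : List Int :=
  let l : List Int :=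
    (PySem.List.pyRange 1 10 1).foldl (fun l num =>
      ((PySem.List.pyRange (num + 1) 10 1).foldl
        (fun (p : List Int × Int) j =>
          let num := p.2 * 10 + j
          (if num ≤ high ∧ num ≥ low then p.1 ++ [num] else p.1, num))
        (l, num)).1) []
  PySem.List.sorted l (fun x => x) false

-- ===== PORT B =====
def suitableNumber_alt (low : Int) (high : Int) : List Int :=
  let s : String := "123456789"
  -- int(s[i:j]) always succeeds here (digit slices of length ≥ 2): the port is exact, getD 0 is unreachable
  let cands : List Int :=
    (PySem.List.pyRange 0 9 1).flatMap (fun i =>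
      (PySem.List.pyRange (i + 2) 10 1).map (fun j =>
        (PySem.Int.ofStr? (PySem.Str.slice s (some i) (some j))).getD 0))
  PySem.List.sorted (cands.filter (fun n => decide (low ≤ n ∧ n ≤ high))) (fun x => x) false

-- ===== PRECONDITION & SPEC =====
def Spec_suitableNumber (low : Int) (high : Int) (out : List Int) : Prop := out = suitableNumber_alt low high
instance (low : Int) (high : Int) (out : List Int) : Decidable (Spec_suitableNumber low high out) := by unfold Spec_suitableNumber; infer_instance

-- ===== CLAIM (what is proved, stated in full; the proofs are below) =====
def Claim_equal_suitableNumber : Prop := ∀ (low : Int) (high : Int), Dom_suitableNumber low high → Spec_suitableNumber low high (suitableNumber low high)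

-- ===== LEMMAS AND PROOFS =====

-- the values A's inner accumulator takes: num, num*10+j1, (num*10+j1)*10+j2, …
def pvChain (num : Int) : List Int → List Int
  | [] => []
  | j :: js => (num * 10 + j) :: pvChain (num * 10 + j) js

theorem pvChain_last (num : Int) (js : List Int) :
    ∀ l, ((js.foldl
        (fun (p : List Int × Int) j =>
          (if p.2 * 10 + j ≤ high ∧ p.2 * 10 + j ≥ low then p.1 ++ [p.2 * 10 + j] else p.1,
            p.2 * 10 + j)) (l, num)).1)
      = l ++ (pvChain num js).filter (fun n => decide (n ≤ high ∧ n ≥ low)) := by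
  induction js generalizing num with
  | nil => intro l; simp [pvChain]
  | cons j js ih =>
    intro l
    simp only [List.foldl_cons, pvChain, List.filter_cons]
    by_cases h : num * 10 + j ≤ high ∧ num * 10 + j ≥ low
    · simp [h, ih]
    · simp [h, ih]

theorem pvFilter_swap (low high : Int) (l : List Int) :
    l.filter (fun n => decide (n ≤ high ∧ n ≥ low))
      = l.filter (fun n => decide (low ≤ n ∧ n ≤ high)) := by
  apply List.filter_congr
  intro a _
  simp [ge_iff_le, and_comm]

-- ===== VERDICT (by name: the statement is the Claim_ definition above) =====
theorem suitableNumber_spec : Claim_equal_suitableNumber := by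
  unfold Claim_equal_suitableNumber
  intro low high _
  unfold Spec_suitableNumber suitableNumber suitableNumber_alt
  simp only []
  -- rewrite A's inner fold into a filter over the chain of accumulator values
  have hinner : ∀ (l : List Int) (num : Int),
      ((PySem.List.pyRange (num + 1) 10 1).foldl
        (fun (p : List Int × Int) j =>
          (if p.2 * 10 + j ≤ high ∧ p.2 * 10 + j ≥ low then p.1 ++ [p.2 * 10 + j] else p.1,
            p.2 * 10 + j)) (l, num)).1
        = l ++ (pvChain num (PySem.List.pyRange (num + 1) 10 1)).filter
            (fun n => decide (n ≤ high ∧ n ≥ low)) := by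
    intro l num; exact pvChain_last (high := high) (low := low) num _ l
  simp only [hinner]
  rw [PySem.List.foldl_append_eq_flatMap]
  rw [← List.filter_flatMap]
  rw [pvFilter_swap low high]
  congr 1
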